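-- pv_equiv track=rewrite | github.com/tobymao/sqlglot | sqlglot/dialects/mysql.py | _has_time_specifier
-- ===== SOURCE A (Python) =====
-- TIME_SPECIFIERS = {"f", "H", "h", "I", "i", "k", "l", "p", "r", "S", "s", "T"}
--
-- def _has_time_specifier(date_format: str) -> bool:
--     i = 0
--     length = len(date_format)
--
--     while i < length:
--         if date_format[i] == "%":
--             i += 1
--             if i < length and date_format[i] in TIME_SPECIFIERS:
--                 return True
--         i += 1
--     return False
-- ===== SOURCE B (Python) =====
-- TIME_SPECIFIERS = {"f", "H", "h", "I", "i", "k", "l", "p", "r", "S", "s", "T"}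
--
--
-- def _has_time_specifier(date_format: str) -> bool:
--     # Run-length parity: a character is read as a format specifier exactly
--     # when it is preceded by an ODD number of consecutive '%' signs (an even
--     # run is fully consumed as escaped "%%" pairs).  So keep the length of the
--     # current '%' run and, at each non-'%' char, test it only if the run that
--     # just ended was odd.  No pairing, no index jumps, no early return.
--     run = 0
--     hit = False
--     for ch in date_format:
--         if ch == "%":
--             run += 1
--         else:
--             hit = hit or (run % 2 == 1 and ch in TIME_SPECIFIERS)
--             run = 0
--     return hit
-- ===== Notes on version B (the rewrite author's own statement) =====
-- stated objective: alternative
-- what changed: Replaces A's index walk that consumes each '%'+next-char pair (with an early return) by a run-length-parity scan: fold over the characters keeping the length of the current run of '%' signs and test a character only when the run that just ended is odd, since an even run is entirely escaped '%%' pairs.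
import Mathlib
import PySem

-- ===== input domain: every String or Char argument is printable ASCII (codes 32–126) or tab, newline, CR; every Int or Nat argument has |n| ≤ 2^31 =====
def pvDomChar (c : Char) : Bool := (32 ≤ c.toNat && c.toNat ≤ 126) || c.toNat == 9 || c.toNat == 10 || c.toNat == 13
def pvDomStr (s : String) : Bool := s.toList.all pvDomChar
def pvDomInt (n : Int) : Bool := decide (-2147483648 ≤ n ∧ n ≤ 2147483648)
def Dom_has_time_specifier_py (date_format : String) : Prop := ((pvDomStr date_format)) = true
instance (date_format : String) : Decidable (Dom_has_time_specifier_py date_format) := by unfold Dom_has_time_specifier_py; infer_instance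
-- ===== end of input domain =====

-- B replaces A's pair-consuming index walk by a run-length-parity fold over the characters (objective: alternative, same cost).

-- ===== PORT A =====
-- TIME_SPECIFIERS = {"f", "H", "h", "I", "i", "k", "l", "p", "r", "S", "s", "T"}  (a set of one-char strings, modelled as a set of chars)
def TIME_SPECIFIERS : PySem.Set Char :=
  PySem.Set.ofList ['f', 'H', 'h', 'I', 'i', 'k', 'l', 'p', 'r', 'S', 's', 'T']

-- A's while loop; date_format[i] is only read under the guard i < length, so List.getD is exact there
def aLoop (cs : List Char) (length : Nat) (i : Nat) : Bool :=
  if i < length then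
    if cs.getD i ' ' = '%' then
      -- i += 1
      if i + 1 < length && PySem.Set.contains TIME_SPECIFIERS (cs.getD (i + 1) ' ') then
        true
      else aLoop cs length (i + 1 + 1)
    else aLoop cs length (i + 1)
  else false
termination_by length - i

def has_time_specifier_py (date_format : String) : Bool :=
  aLoop date_format.toList date_format.toList.length 0

-- ===== PORT B =====
-- Source B's for loop: state = (run, hit); run = length of the current run of '%' signs,
-- hit accumulates 'run that just ended is odd AND this char is a time specifier'
def bStep (st : Nat × Bool) (ch : Char) : Nat × Bool :=
  if ch = '%' then (st.1 + 1, st.2)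
  else (0, st.2 || (st.1 % 2 == 1 && PySem.Set.contains TIME_SPECIFIERS ch))

def has_time_specifier_py_alt (date_format : String) : Bool :=
  (date_format.toList.foldl bStep (0, false)).2

-- ===== PRECONDITION & SPEC =====
def Spec_has_time_specifier_py (date_format : String) (out : Bool) : Prop := out = has_time_specifier_py_alt date_format
instance (date_format : String) (out : Bool) : Decidable (Spec_has_time_specifier_py date_format out) := by unfold Spec_has_time_specifier_py; infer_instance

-- ===== CLAIM =====
def Claim_equal_has_time_specifier_py : Prop := ∀ (date_format : String), Dom_has_time_specifier_py date_format → Spec_has_time_specifier_py date_format (has_time_specifier_py date_format)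

-- ===== LEMMAS AND PROOFS =====

-- structural restatement of A's scan (consume '%'+next-char pairs, left to right)
def aRec : List Char → Bool
  | [] => false
  | [_] => false
  | c :: d :: rs =>
    if c = '%' then
      if PySem.Set.contains TIME_SPECIFIERS d then true else aRec rs
    else aRec (d :: rs)

theorem drop_two_cons {cs : List Char} {i : Nat} (h : i + 1 < cs.length) :
    cs.drop i = cs[i] :: cs[i + 1] :: cs.drop (i + 2) :=
  by rw [List.drop_eq_getElem_cons (by omega : i < cs.length),
        List.drop_eq_getElem_cons h]

theorem drop_one_nil {cs : List Char} {i : Nat} (hi : i < cs.length) (h : ¬ i + 1 < cs.length) :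
    cs.drop i = [cs[i]] := by
  rw [List.drop_eq_getElem_cons hi, List.drop_eq_nil_of_le (by omega)]

theorem aLoop_eq_aRec (cs : List Char) (i : Nat) :
    aLoop cs cs.length i = aRec (cs.drop i) := by
  rw [aLoop]
  by_cases h : i < cs.length
  · rw [if_pos h]
    by_cases hp : cs.getD i ' ' = '%'
    · rw [List.getD_eq_getElem cs ' ' h] at hp
      rw [if_pos (by rw [List.getD_eq_getElem cs ' ' h]; exact hp)]
      by_cases h1 : i + 1 < cs.length
      · rw [drop_two_cons h1]
        simp only [aRec, if_pos hp]
        rw [show (decide (i + 1 < cs.length) &&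
              PySem.Set.contains TIME_SPECIFIERS (cs.getD (i + 1) ' ')) =
              PySem.Set.contains TIME_SPECIFIERS cs[i + 1] from by
            rw [List.getD_eq_getElem cs ' ' h1]; simp [h1]]
        by_cases hc : PySem.Set.contains TIME_SPECIFIERS cs[i + 1] = true
        · rw [if_pos hc, if_pos hc]
        · rw [if_neg hc, if_neg hc, aLoop_eq_aRec cs (i + 1 + 1)]
      · rw [drop_one_nil h h1, if_neg (by simp [h1]), aLoop_eq_aRec cs (i + 1 + 1)]
        rw [List.drop_eq_nil_of_le (by omega)]
        rfl
    · rw [List.getD_eq_getElem cs ' ' h] at hp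
      rw [if_neg (by rw [List.getD_eq_getElem cs ' ' h]; exact hp), aLoop_eq_aRec cs (i + 1)]
      by_cases h1 : i + 1 < cs.length
      · rw [drop_two_cons h1]
        simp only [aRec]
        rw [if_neg hp, List.drop_eq_getElem_cons h1]
      · rw [drop_one_nil h h1, List.drop_eq_nil_of_le (by omega)]
        rfl
  · rw [if_neg h, List.drop_eq_nil_of_le (by omega)]
    rfl
termination_by cs.length + 1 - i
decreasing_by all_goals omega

-- a run of two '%' signs is fully escaped: A's scan just skips it
theorem aRec_pct_pct (rs : List Char) : aRec ('%' :: '%' :: rs) = aRec rs := by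
  have h : ¬ ('%' ∈ TIME_SPECIFIERS) := by decide
  simp [aRec, h]

-- a non-'%' head outside any pair is ignored by A's scan
theorem aRec_cons_ne (c : Char) (rs : List Char) (h : c ≠ '%') : aRec (c :: rs) = aRec rs := by
  cases rs with
  | nil => rfl
  | cons d ds => simp [aRec, h]

-- the fold invariant: pending run parity decides whether a virtual leading '%' remains
theorem foldl_bStep_eq (cs : List Char) (run : Nat) (hit : Bool) :
    (cs.foldl bStep (run, hit)).2 =
      (hit || (if run % 2 = 1 then aRec ('%' :: cs) else aRec cs)) := by
  induction cs generalizing run hit with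
  | nil =>
    simp only [List.foldl_nil]
    split <;> simp [aRec]
  | cons c rest ih =>
    by_cases hc : c = '%'
    · subst hc
      by_cases hr : run % 2 = 1
      · have h2 : ¬ (run + 1) % 2 = 1 := by omega
        simp [bStep, ih, h2, hr, aRec_pct_pct]
      · have h2 : (run + 1) % 2 = 1 := by omega
        simp [bStep, ih, h2, hr]
    · by_cases hr : run % 2 = 1
      · simp only [List.foldl_cons, bStep, if_neg hc, ih]
        rw [aRec_cons_ne c rest hc]
        cases rest with
        | nil =>
          simp [hr, aRec]
        | cons d ds =>
          have h : aRec ('%' :: c :: d :: ds) =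
              (PySem.Set.contains TIME_SPECIFIERS c || aRec (d :: ds)) := by
            simp only [aRec]
            by_cases hm : PySem.Set.contains TIME_SPECIFIERS c = true <;> simp_all
          simp [hr, h, Bool.or_assoc]
      · simp only [List.foldl_cons, bStep, if_neg hc, ih]
        have h2 : (run % 2 == 1) = false := by simpa using hr
        simp [hr, h2, aRec_cons_ne c rest hc]

-- ===== VERDICT (by name: the statement is the Claim_ definition above) =====
theorem has_time_specifier_py_spec : Claim_equal_has_time_specifier_py := by
  intro date_format _
  unfold Spec_has_time_specifier_py has_time_specifier_py has_time_specifier_py_alt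
  rw [aLoop_eq_aRec, List.drop_zero, foldl_bStep_eq]
  norm_num
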